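-- pv_equiv track=rewrite | github.com/bceverly/sysmanage-agent | src/sysmanage_agent/operations/package_installation_helpers.py | group_packages_by_manager
-- ===== SOURCE A (Python) =====
-- from typing import Any, Dict, List, Optional, Tuple
--
-- def group_packages_by_manager(
--     valid_packages: List[Dict[str, Any]],
-- ) -> Dict[str, List[Dict[str, Any]]]:
--     """
--     Group packages by their package manager.
--
--     Args:
--         valid_packages: List of valid package dictionaries
--
--     Returns:
--         Dictionary mapping package manager name to list of packages
--     """
--     package_groups = {}
--     for package in valid_packages:
--         package_manager = package.get("package_manager", "auto")
--         if package_manager == "auto":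
--             # Auto-detect package manager (assume apt for now)
--             package_manager = "apt"
--
--         if package_manager not in package_groups:
--             package_groups[package_manager] = []
--         package_groups[package_manager].append(package)
--
--     return package_groups
-- ===== SOURCE B (Python) =====
-- def group_packages_by_manager(valid_packages):
--     """Group packages by package manager: two-pass — dedup keys in first-occurrence
--     order, then build each group by filtering the input list."""
--     def manager(package):
--         m = package.get("package_manager", "auto")
--         return "apt" if m == "auto" else m
--     keys = list(dict.fromkeys(manager(p) for p in valid_packages))
--     return {k: [p for p in valid_packages if manager(p) == k] for k in keys}
-- ===== Notes on version B (the rewrite author's own statement) =====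
-- stated objective: alternative
-- what changed: Replaces the single-pass incremental dict mutation (insert-empty-then-append per element) with a two-pass scheme: dedup the manager keys in first-occurrence order, then build each group by filtering the whole input per key.
import Mathlib
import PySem

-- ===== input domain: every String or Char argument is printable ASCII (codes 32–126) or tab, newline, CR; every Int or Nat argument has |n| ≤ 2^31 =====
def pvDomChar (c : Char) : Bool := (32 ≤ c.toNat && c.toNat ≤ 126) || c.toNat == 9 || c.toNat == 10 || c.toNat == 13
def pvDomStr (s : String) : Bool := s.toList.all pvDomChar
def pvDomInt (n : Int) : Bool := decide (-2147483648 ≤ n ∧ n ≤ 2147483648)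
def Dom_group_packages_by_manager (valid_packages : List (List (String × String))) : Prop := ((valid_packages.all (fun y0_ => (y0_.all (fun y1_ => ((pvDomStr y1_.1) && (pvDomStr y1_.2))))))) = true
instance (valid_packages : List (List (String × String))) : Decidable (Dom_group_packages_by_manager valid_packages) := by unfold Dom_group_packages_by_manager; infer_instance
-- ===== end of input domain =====

-- B replaces A's single-pass incremental dict mutation by a two-pass scheme (dedup the
-- manager keys in first-occurrence order, then filter the input once per key); objective:
-- alternative decomposition, same results, not claimed faster.

-- package.get("package_manager", "auto") on the association-list representation of a
-- package dict (first match = Python dict lookup under the convention); used by both ports.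
def pvPkgGetMgr (package : List (String × String)) : String :=
  match package.find? (fun kv => kv.1 == "package_manager") with
  | some kv => kv.2
  | none => "auto"

-- ===== PORT A =====
def group_packages_by_manager (valid_packages : List (List (String × String))) : List (String × List (List (String × String))) :=
  (valid_packages.foldl
    (fun package_groups package =>
      let pm0 := pvPkgGetMgr package
      let package_manager := if pm0 == "auto" then "apt" else pm0
      let package_groups :=
        if package_groups.contains package_manager then package_groups
        else package_groups.insert package_manager ([] : List (List (String × String)))
      package_groups.modify package_manager [] (fun l => l ++ [package]))
    PySem.Dict.empty).items

-- ===== PORT B =====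
-- B's key function: normalized manager of a package
def pvManager (package : List (String × String)) : String :=
  let m := pvPkgGetMgr package
  if m == "auto" then "apt" else m

def group_packages_by_manager_alt (valid_packages : List (List (String × String))) : List (String × List (List (String × String))) :=
  let keys := PySem.List.dedup (valid_packages.map pvManager)
  keys.map (fun k => (k, valid_packages.filter (fun p => pvManager p == k)))

-- ===== PRECONDITION & SPEC =====
def Spec_group_packages_by_manager (valid_packages : List (List (String × String))) (out : List (String × List (List (String × String)))) : Prop := out = group_packages_by_manager_alt valid_packages
instance (valid_packages : List (List (String × String))) (out : List (String × List (List (String × String)))) : Decidable (Spec_group_packages_by_manager valid_packages out) := by unfold Spec_group_packages_by_manager; infer_instance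

-- ===== CLAIM (what is proved, stated in full; the proofs are below) =====
def Claim_equal_group_packages_by_manager : Prop := ∀ (valid_packages : List (List (String × String))), Dom_group_packages_by_manager valid_packages → Spec_group_packages_by_manager valid_packages (group_packages_by_manager valid_packages)

-- ===== LEMMAS AND PROOFS =====

-- A's loop body (insert-empty-if-absent, then append) is one dict 'modify' at the key.
theorem pvStep_eq_modify (d : PySem.Dict String (List (List (String × String)))) (k : String)
    (p : List (String × String)) :
    (if d.contains k then d else d.insert k ([] : List (List (String × String)))).modify k []
        (fun l => l ++ [p])
      = d.modify k [] (fun l => l ++ [p]) := by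
  by_cases h : d.contains k
  · simp [h]
  · have h' : d.contains k = false := by simpa using h
    simp only [h, Bool.false_eq_true, if_false, PySem.Dict.modify,
      PySem.Dict.getD_insert_self, PySem.Dict.insert_insert_self,
      PySem.Dict.getD_of_not_contains d ([] : List (List (String × String))) h']

-- A's fold is the canonical key-value grouping fold over (manager p, p) pairs.
theorem pvFold_eq :
    ∀ (vp : List (List (String × String))),
      group_packages_by_manager vp
        = ((vp.map (fun p => (pvManager p, p))).foldl
            (fun d q => d.modify q.1 [] (fun l => l ++ [q.2])) PySem.Dict.empty).items := by
  intro vp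
  unfold group_packages_by_manager
  rw [List.foldl_map]
  congr 1
  apply PySem.List.foldl_congr_mem
  intro d p _
  simpa [pvManager] using pvStep_eq_modify d (pvManager p) p

theorem group_packages_by_manager_spec : Claim_equal_group_packages_by_manager := by
  unfold Claim_equal_group_packages_by_manager
  intro vp _
  unfold Spec_group_packages_by_manager group_packages_by_manager_alt
  rw [pvFold_eq]
  set l := vp.map (fun p => (pvManager p, p)) with hl
  have hnd : ((l.foldl (fun d q => d.modify q.1 [] (fun v => v ++ [q.2]))
      PySem.Dict.empty)).keys.Nodup := by
    have := PySem.Dict.nodup_keys_foldl_modify_key l (fun q => q.1)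
      ([] : List (List (String × String)))
      (fun d q => fun v => v ++ [q.2]) PySem.Dict.empty (by simp)
    simpa using this
  rw [PySem.Dict.items_eq_map_keys _ hnd ([] : List (List (String × String)))]
  have hkeys : ((l.foldl (fun d q => d.modify q.1 [] (fun v => v ++ [q.2]))
      PySem.Dict.empty)).keys = PySem.List.dedup (vp.map pvManager) := by
    have := PySem.Dict.keys_foldl_modify_key l (fun q => q.1)
      ([] : List (List (String × String)))
      (fun d q => fun v => v ++ [q.2]) PySem.Dict.empty
    rw [this, hl, List.map_map, PySem.List.dedup_eq_ofList]
    simp only [PySem.Dict.keys_empty]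
    exact rfl
  rw [hkeys]
  apply List.map_congr_left
  intro k _
  refine congrArg (fun g => (k, g)) ?_
  rw [PySem.Dict.getD_foldl_modify_append]
  simp [hl, List.filter_map, Function.comp_def]
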